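-- pv_equiv track=rewrite | github.com/cmunozmas/nansen_pbgc_processing | src/rtqc/rtqc_tests.py | rtqc13_stuck_value_test
-- ===== SOURCE A (Python) =====
-- def rtqc13_stuck_value_test(var_name, var_data, var_data_qc, pres_data, anc_var_data_qc=None):
--     ''' This test looks for all measurements of temperature
--         or salinity in a profile being identical.
--         Action: If this occurs, all of the values of the
--         affected variable should be flagged as bad data. If
--         temperature and salinity are affected, all observed
--         values are flagged as bad data.
--
--     '''
--     var_data_qc_stuck = [var_data_qc[0],var_data_qc[1],var_data_qc[2],var_data_qc[3]]
--     for i in range(4,len(var_data)):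
--         if var_data_qc[i] == 9:
--             var_data_qc_stuck.append(9)
--         else:
--             V2 = var_data[i-4]
--             V3 = var_data[i-3]
--             V4 = var_data[i-2]
--             V5 = var_data[i-1]
--             V6 = var_data[i]
--
--             values = [V2,V3,V4,V5,V6]
--             result = values.count(values[4]) == len(values)
--
--             if result == True:
--                 var_data_qc_stuck.append(4)
--             else:
--                 if var_data_qc[i] < 1:
--                     if anc_var_data_qc[i] > 1:
--                         var_data_qc_stuck.append(4)
--                     else:
--                         var_data_qc_stuck.append(1)
--                 else:
--                     if anc_var_data_qc[i] > 1:
--                         var_data_qc_stuck.append(4)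
--                     else:
--                         var_data_qc_stuck.append(var_data_qc[i])
--
--     return var_data_qc_stuck
-- ===== SOURCE B (Python) =====
-- def rtqc13_stuck_value_test(var_name, var_data, var_data_qc, pres_data, anc_var_data_qc=None):
--     out = [var_data_qc[0], var_data_qc[1], var_data_qc[2], var_data_qc[3]]
--     run = 1  # length of the run of equal var_data values ending at the current index
--     for i in range(1, len(var_data)):
--         run = run + 1 if var_data[i] == var_data[i - 1] else 1
--         if i < 4:
--             continue
--         q = var_data_qc[i]
--         if q == 9:
--             out.append(9)
--         elif run >= 5:
--             out.append(4)
--         elif anc_var_data_qc[i] > 1: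
--             out.append(4)
--         else:
--             out.append(q if q >= 1 else 1)
--     return out
-- ===== Notes on version B (the rewrite author's own statement) =====
-- stated objective: faster
-- what changed: B replaces A's per-index rebuilding of the 5-element window and the values.count(...) == len(values) test by a single run-length counter of consecutive equal var_data values threaded through one loop from index 1, testing run >= 5, and collapses A's duplicated qc<1 / qc>=1 anc cascade into one anc test plus a final q-vs-1 choice.
import Mathlib
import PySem

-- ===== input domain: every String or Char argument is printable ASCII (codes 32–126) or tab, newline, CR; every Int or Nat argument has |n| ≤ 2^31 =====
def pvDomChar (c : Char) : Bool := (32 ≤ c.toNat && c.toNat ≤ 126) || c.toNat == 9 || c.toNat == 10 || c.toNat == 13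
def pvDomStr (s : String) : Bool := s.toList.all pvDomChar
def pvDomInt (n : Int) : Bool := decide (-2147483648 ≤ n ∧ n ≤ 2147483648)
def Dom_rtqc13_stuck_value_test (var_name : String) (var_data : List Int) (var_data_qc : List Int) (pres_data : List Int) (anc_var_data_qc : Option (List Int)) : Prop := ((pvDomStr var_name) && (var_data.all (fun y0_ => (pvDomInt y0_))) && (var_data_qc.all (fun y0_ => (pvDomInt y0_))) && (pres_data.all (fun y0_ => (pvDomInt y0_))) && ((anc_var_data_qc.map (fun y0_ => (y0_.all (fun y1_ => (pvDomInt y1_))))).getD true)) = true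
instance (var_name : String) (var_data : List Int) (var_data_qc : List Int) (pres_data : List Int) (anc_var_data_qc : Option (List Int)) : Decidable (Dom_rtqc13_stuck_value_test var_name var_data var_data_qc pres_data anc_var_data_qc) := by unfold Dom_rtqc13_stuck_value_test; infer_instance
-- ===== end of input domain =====

-- B replaces A's rebuilt 5-element window and values.count test by an incremental
-- run-length counter of consecutive equal var_data values (objective: faster, constant-factor; measured).

-- xs[i]; exact where Python returns; default 0 where Python would raise IndexError
-- (those inputs are excluded by Pre_).
def pvGetI (xs : List Int) (i : Int) : Int := PySem.List.pyGetD xs i 0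

-- ===== PORT A =====
-- the for-loop of A, as recursion on the index i
def pvLoopA (v qc : List Int) (anc : Option (List Int)) (i : Nat) (acc : List Int) : List Int :=
  if _h : i < v.length then
    let acc' :=
      if pvGetI qc (i : Int) = 9 then acc ++ [9]
      else
        let V2 := pvGetI v ((i : Int) - 4)
        let V3 := pvGetI v ((i : Int) - 3)
        let V4 := pvGetI v ((i : Int) - 2)
        let V5 := pvGetI v ((i : Int) - 1)
        let V6 := pvGetI v (i : Int)
        let values := [V2, V3, V4, V5, V6]
        let result := PySem.List.count values V6 = values.length
        if result then acc ++ [4]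
        else if pvGetI qc (i : Int) < 1 then
          -- anc_var_data_qc[i]: None or short list raises in Python (excluded by Pre_)
          if pvGetI (anc.getD []) (i : Int) > 1 then acc ++ [4] else acc ++ [1]
        else
          if pvGetI (anc.getD []) (i : Int) > 1 then acc ++ [4] else acc ++ [pvGetI qc (i : Int)]
    pvLoopA v qc anc (i + 1) acc'
  else acc
termination_by v.length - i

def rtqc13_stuck_value_test (var_name : String) (var_data : List Int) (var_data_qc : List Int) (pres_data : List Int) (anc_var_data_qc : Option (List Int)) : List Int :=
  pvLoopA var_data var_data_qc anc_var_data_qc 4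
    [pvGetI var_data_qc 0, pvGetI var_data_qc 1, pvGetI var_data_qc 2, pvGetI var_data_qc 3]

-- ===== PORT B =====
-- B's single loop from i = 1, threading the run-length counter `run`
def pvLoopB (v qc : List Int) (anc : Option (List Int)) (i : Nat) (run : Int) (acc : List Int) : List Int :=
  if _h : i < v.length then
    let run' := if pvGetI v (i : Int) = pvGetI v ((i : Int) - 1) then run + 1 else 1
    if i < 4 then pvLoopB v qc anc (i + 1) run' acc
    else
      let q := pvGetI qc (i : Int)
      let acc' :=
        if q = 9 then acc ++ [9]
        else if run' ≥ 5 then acc ++ [4]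
        else if pvGetI (anc.getD []) (i : Int) > 1 then acc ++ [4]
        else acc ++ [if q ≥ 1 then q else 1]
      pvLoopB v qc anc (i + 1) run' acc'
  else acc
termination_by v.length - i

def rtqc13_stuck_value_test_alt (var_name : String) (var_data : List Int) (var_data_qc : List Int) (pres_data : List Int) (anc_var_data_qc : Option (List Int)) : List Int :=
  pvLoopB var_data var_data_qc anc_var_data_qc 1 1
    [pvGetI var_data_qc 0, pvGetI var_data_qc 1, pvGetI var_data_qc 2, pvGetI var_data_qc 3]

-- ===== PRECONDITION & SPEC =====
-- Pre_ excludes exactly the inputs on which the Python A raises: fewer than 4 qc values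
-- (IndexError on var_data_qc[3]), qc shorter than var_data (IndexError in the loop), or a
-- reached anc_var_data_qc[i] access with anc None (TypeError) or too short (IndexError);
-- the access is reached iff var_data_qc[i] ≠ 9 and the five values ending at i are not all equal.
def Pre_rtqc13_stuck_value_test (var_name : String) (var_data : List Int) (var_data_qc : List Int) (pres_data : List Int) (anc_var_data_qc : Option (List Int)) : Prop :=
  4 ≤ var_data_qc.length ∧ var_data.length ≤ var_data_qc.length ∧
  ∀ i : Nat, i < var_data.length → 4 ≤ i →
    (var_data_qc.getD i 0 = 9 ∨
     (var_data.getD (i - 4) 0 = var_data.getD i 0 ∧ var_data.getD (i - 3) 0 = var_data.getD i 0 ∧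
      var_data.getD (i - 2) 0 = var_data.getD i 0 ∧ var_data.getD (i - 1) 0 = var_data.getD i 0) ∨
     (∃ l, anc_var_data_qc = some l ∧ i < l.length))
instance (var_name : String) (var_data : List Int) (var_data_qc : List Int) (pres_data : List Int) (anc_var_data_qc : Option (List Int)) : Decidable (Pre_rtqc13_stuck_value_test var_name var_data var_data_qc pres_data anc_var_data_qc) := by
  unfold Pre_rtqc13_stuck_value_test; infer_instance

def pvWitness_rtqc13_stuck_value_test : String × List Int × List Int × List Int × Option (List Int) :=
  ("TEMP", [5, 5, 5, 5, 5, 3, 3], [1, 1, 1, 1, 1, 0, 9], [], some [1, 1, 1, 1, 1, 2, 1])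

def Spec_rtqc13_stuck_value_test (var_name : String) (var_data : List Int) (var_data_qc : List Int) (pres_data : List Int) (anc_var_data_qc : Option (List Int)) (out : List Int) : Prop := out = rtqc13_stuck_value_test_alt var_name var_data var_data_qc pres_data anc_var_data_qc
instance (var_name : String) (var_data : List Int) (var_data_qc : List Int) (pres_data : List Int) (anc_var_data_qc : Option (List Int)) (out : List Int) : Decidable (Spec_rtqc13_stuck_value_test var_name var_data var_data_qc pres_data anc_var_data_qc out) := by unfold Spec_rtqc13_stuck_value_test; infer_instance

-- ===== CLAIM (what is proved, stated in full; the proofs are below) =====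
def Claim_equal_rtqc13_stuck_value_test : Prop := ∀ (var_name : String) (var_data : List Int) (var_data_qc : List Int) (pres_data : List Int) (anc_var_data_qc : Option (List Int)), Dom_rtqc13_stuck_value_test var_name var_data var_data_qc pres_data anc_var_data_qc → Pre_rtqc13_stuck_value_test var_name var_data var_data_qc pres_data anc_var_data_qc → Spec_rtqc13_stuck_value_test var_name var_data var_data_qc pres_data anc_var_data_qc (rtqc13_stuck_value_test var_name var_data var_data_qc pres_data anc_var_data_qc)

-- ===== LEMMAS AND PROOFS =====

-- the run length of equal consecutive var_data values ending at index i (the value B's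
-- `run` variable holds after the update in iteration i)
def pvRun (v : List Int) : Nat → Int
  | 0 => 1
  | i + 1 => if pvGetI v ((i : Int) + 1) = pvGetI v (i : Int) then pvRun v i + 1 else 1

theorem pvRun_ge_one (v : List Int) (i : Nat) : 1 ≤ pvRun v i := by
  cases i with
  | zero => simp [pvRun]
  | succ j =>
    simp only [pvRun]
    split
    · have := pvRun_ge_one v j; omega
    · omega

-- B's test `run ≥ 5` at index j + 4 says exactly that the five values ending there are equal
theorem run5_iff (v : List Int) (j : Nat) :
    5 ≤ pvRun v (j + 4) ↔
      (pvGetI v (((j + 4 : Nat) : Int) - 4) = pvGetI v ((j + 4 : Nat) : Int) ∧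
       pvGetI v (((j + 4 : Nat) : Int) - 3) = pvGetI v ((j + 4 : Nat) : Int) ∧
       pvGetI v (((j + 4 : Nat) : Int) - 2) = pvGetI v ((j + 4 : Nat) : Int) ∧
       pvGetI v (((j + 4 : Nat) : Int) - 1) = pvGetI v ((j + 4 : Nat) : Int)) := by
  have h1 := pvRun_ge_one v j
  simp only [pvRun]
  push_cast
  ring_nf
  split_ifs <;> omega

-- A's window test, reduced to the four equalities of run5_iff
theorem count_window (a b c d e : Int) :
    (PySem.List.count [a, b, c, d, e] e = ([a, b, c, d, e] : List Int).length) ↔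
      (a = e ∧ b = e ∧ c = e ∧ d = e) := by
  simp [PySem.List.count_eq, List.count_cons]
  split_ifs <;> simp_all

-- the main loop correspondence, for i ≥ 4, with B's run equal to pvRun at i - 1
theorem loop_eq (v qc : List Int) (anc : Option (List Int)) :
    ∀ (k i : Nat) (acc : List Int), v.length ≤ i + k → 4 ≤ i →
      pvLoopB v qc anc i (pvRun v (i - 1)) acc = pvLoopA v qc anc i acc := by
  intro k
  induction k with
  | zero =>
    intro i acc hk _
    have h : ¬ i < v.length := by omega
    rw [pvLoopB, pvLoopA]
    simp [h]
  | succ k ih =>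
    intro i acc hk hi4
    by_cases h : i < v.length
    · obtain ⟨j, rfl⟩ : ∃ j, i = j + 4 := ⟨i - 4, by omega⟩
      rw [pvLoopB, pvLoopA]
      simp only [dif_pos h, Nat.not_lt.mpr hi4, if_false]
      have hrun : (if pvGetI v ((j + 4 : Nat) : Int) = pvGetI v (((j + 4 : Nat) : Int) - 1) then
          pvRun v (j + 4 - 1) + 1 else 1) = pvRun v (j + 4) := by
        have e2 : (((j + 4 : Nat) : Int)) - 1 = ((j + 3 : Nat) : Int) := by push_cast; ring
        have e1 : ((j + 4 : Nat) : Int) = ((j + 3 : Nat) : Int) + 1 := by push_cast; ring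
        have e3 : j + 4 - 1 = j + 3 := rfl
        rw [e2, e1, e3]
        rfl
      rw [hrun]
      have hstuck : (5 ≤ pvRun v (j + 4)) ↔
          (PySem.List.count
              [pvGetI v (((j + 4 : Nat) : Int) - 4), pvGetI v (((j + 4 : Nat) : Int) - 3),
               pvGetI v (((j + 4 : Nat) : Int) - 2), pvGetI v (((j + 4 : Nat) : Int) - 1),
               pvGetI v ((j + 4 : Nat) : Int)] (pvGetI v ((j + 4 : Nat) : Int)) =
            ([pvGetI v (((j + 4 : Nat) : Int) - 4), pvGetI v (((j + 4 : Nat) : Int) - 3),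
              pvGetI v (((j + 4 : Nat) : Int) - 2), pvGetI v (((j + 4 : Nat) : Int) - 1),
              pvGetI v ((j + 4 : Nat) : Int)] : List Int).length) := by
        rw [count_window, run5_iff]
      -- compare the appended element in every branch, then recurse via ih
      by_cases hq9 : pvGetI qc ((j + 4 : Nat) : Int) = 9
      · simp only [hq9, if_pos]
        have := ih (j + 4 + 1) (acc ++ [9]) (by omega) (by omega)
        simpa using this
      · simp only [if_neg hq9]
        by_cases hs : 5 ≤ pvRun v (j + 4)
        · have hc := hstuck.mp hs
          simp only [if_pos hs, if_pos hc]
          have := ih (j + 4 + 1) (acc ++ [4]) (by omega) (by omega)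
          simpa using this
        · have hc : ¬ _ := fun hcc => hs (hstuck.mpr hcc)
          simp only [if_neg hs, if_neg hc]
          by_cases ha : pvGetI (anc.getD []) ((j + 4 : Nat) : Int) > 1
          · simp only [if_pos ha]
            have hB : (if pvGetI qc ((j + 4 : Nat) : Int) < 1 then (acc ++ [4]) else (acc ++ [4])) = acc ++ [4] := by
              split <;> rfl
            have := ih (j + 4 + 1) (acc ++ [4]) (by omega) (by omega)
            split <;> simpa using this
          · simp only [if_neg ha]
            by_cases hq1 : pvGetI qc ((j + 4 : Nat) : Int) < 1
            · have : ¬ (1 : Int) ≤ pvGetI qc ((j + 4 : Nat) : Int) := by omega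
              simp only [if_pos hq1, if_neg this]
              have := ih (j + 4 + 1) (acc ++ [1]) (by omega) (by omega)
              simpa using this
            · have h1 : (1 : Int) ≤ pvGetI qc ((j + 4 : Nat) : Int) := by omega
              simp only [if_neg hq1, if_pos h1]
              have := ih (j + 4 + 1) (acc ++ [pvGetI qc ((j + 4 : Nat) : Int)]) (by omega) (by omega)
              simpa using this
    · rw [pvLoopB, pvLoopA]
      simp [h]

-- B's warm-up iterations 1, 2, 3 only maintain `run`; they append nothing
theorem loop_warmup (v qc : List Int) (anc : Option (List Int)) (acc : List Int) :
    pvLoopB v qc anc 1 1 acc = pvLoopA v qc anc 4 acc := by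
  have h1 : (1 : Int) = pvRun v 0 := rfl
  have step : ∀ i : Nat, 1 ≤ i → i < 4 →
      pvLoopB v qc anc i (pvRun v (i - 1)) acc = pvLoopB v qc anc (i + 1) (pvRun v i) acc := by
    intro i h1i hi4
    by_cases h : i < v.length
    · obtain ⟨j, rfl⟩ : ∃ j, i = j + 1 := ⟨i - 1, by omega⟩
      rw [pvLoopB]
      have hrun : (if pvGetI v ((j + 1 : Nat) : Int) = pvGetI v (((j + 1 : Nat) : Int) - 1) then
          pvRun v (j + 1 - 1) + 1 else 1) = pvRun v (j + 1) := by
        have e2 : (((j + 1 : Nat) : Int)) - 1 = (j : Int) := by push_cast; ring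
        have e1 : ((j + 1 : Nat) : Int) = (j : Int) + 1 := by push_cast; ring
        have e3 : j + 1 - 1 = j := rfl
        rw [e2, e1, e3]
        rfl
      simp only [dif_pos h, if_pos hi4, hrun]
    · rw [pvLoopB, pvLoopB]
      have h2 : ¬ i + 1 < v.length := by omega
      simp [h, h2]
  rw [h1]
  have e0 : (0 : Nat) = 1 - 1 := rfl
  rw [e0]
  rw [step 1 (by omega) (by omega), step 2 (by omega) (by omega), step 3 (by omega) (by omega)]
  exact loop_eq v qc anc v.length 4 acc (by omega) (by omega)

-- ===== VERDICT (by name: the statement is the Claim_ definition above) =====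
theorem rtqc13_stuck_value_test_spec : Claim_equal_rtqc13_stuck_value_test := by
  intro var_name var_data var_data_qc pres_data anc_var_data_qc _ _
  unfold Spec_rtqc13_stuck_value_test rtqc13_stuck_value_test rtqc13_stuck_value_test_alt
  exact (loop_warmup var_data var_data_qc anc_var_data_qc _).symm
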